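-- pv_equiv track=rewrite | github.com/dataelement/bisheng | src/bisheng-langchain/experimental/contract/llm_extract.py | post_extract_res
-- ===== SOURCE A (Python) =====
-- from collections import defaultdict
--
-- def post_extract_res(split_docs_extract, split_docs_content, schema):
--     kv_results = defaultdict(list)
--     for ext_res, content in zip(split_docs_extract, split_docs_content):
--         # 每一个split_doc的提取结果
--         for key, value in ext_res.items():
--             # 去掉非法key和没有内容的key
--             if (key not in schema) or (not value):
--                 continue
--
--             if key not in kv_results:
--                 kv_results[key].append(value)
--             else:
--                 # 去重
--                 if value in kv_results[key]:
--                     continue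
--                 kv_results[key].append(value)
--
--     return kv_results
-- ===== SOURCE B (Python) =====
-- from collections import defaultdict
--
--
-- def post_extract_res(split_docs_extract, split_docs_content, schema):
--     # Flatten everything into one stream of valid (key, value) pairs,
--     # dedup the PAIRS once (per-key value dedup == pair dedup), then group.
--     schema_set = set(schema)
--     pairs = [(k, v)
--              for ext, _ in zip(split_docs_extract, split_docs_content)
--              for k, v in ext.items()
--              if k in schema_set and v]
--     pairs = list(dict.fromkeys(pairs))
--     result = defaultdict(list)
--     for key in dict.fromkeys(k for k, _ in pairs):
--         result[key] = [v for k, v in pairs if k == key]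
--     return result
-- ===== Notes on version B (the rewrite author's own statement) =====
-- stated objective: faster
-- what changed: A builds the result dict incrementally, scanning the growing per-key value list ('value in kv_results[key]') for every insertion; B flattens all documents into one stream of valid (key,value) pairs, deduplicates the pairs once with a single hash-based dict.fromkeys, and then groups values per key from the deduplicated pair list.
import Mathlib
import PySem

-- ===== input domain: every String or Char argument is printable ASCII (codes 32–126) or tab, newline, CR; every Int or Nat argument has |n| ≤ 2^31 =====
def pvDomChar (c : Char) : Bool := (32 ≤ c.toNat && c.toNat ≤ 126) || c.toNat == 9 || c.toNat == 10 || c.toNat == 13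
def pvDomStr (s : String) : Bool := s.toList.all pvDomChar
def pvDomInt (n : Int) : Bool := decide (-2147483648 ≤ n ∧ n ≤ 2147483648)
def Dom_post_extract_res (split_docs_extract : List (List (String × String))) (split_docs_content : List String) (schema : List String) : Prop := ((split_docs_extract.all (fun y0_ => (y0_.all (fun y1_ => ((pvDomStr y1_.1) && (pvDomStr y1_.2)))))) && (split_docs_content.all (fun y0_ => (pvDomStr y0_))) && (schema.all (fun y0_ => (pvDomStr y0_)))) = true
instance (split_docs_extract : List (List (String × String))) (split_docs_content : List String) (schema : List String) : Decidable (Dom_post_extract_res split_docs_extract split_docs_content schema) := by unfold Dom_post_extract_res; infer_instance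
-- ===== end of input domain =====

-- B replaces A's incremental dict building with an in-loop list-membership dedup by: flatten valid pairs, hash-dedup the pairs once, then group values per key (objective: faster, measured).

-- ===== PORT A =====
-- one item of A's inner loop: skip invalid/empty key, then append with dedup check
def pvStepA (schema : List String) (kv : PySem.Dict String (List String)) (p : String × String) : PySem.Dict String (List String) :=
  if !(schema.contains p.1) || p.2 == "" then kv
  else if !(kv.contains p.1) then kv.insert p.1 (kv.getD p.1 [] ++ [p.2])
  else if (kv.getD p.1 []).contains p.2 then kv
  else kv.insert p.1 (kv.getD p.1 [] ++ [p.2])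

def post_extract_res (split_docs_extract : List (List (String × String))) (split_docs_content : List String) (schema : List String) : List (String × List String) :=
  ((split_docs_extract.zip split_docs_content).foldl
    (fun kv pr => pr.1.foldl (pvStepA schema) kv) PySem.Dict.empty).items

-- ===== PORT B =====
-- group a (deduplicated) pair list: distinct keys in order, each with the values filtered from the list
def pvGroup (pairs : List (String × String)) : List (String × List String) :=
  (PySem.List.dedup (pairs.map Prod.fst)).map
    (fun key => (key, (pairs.filter (fun q => q.1 == key)).map Prod.snd))

def post_extract_res_alt (split_docs_extract : List (List (String × String))) (split_docs_content : List String) (schema : List String) : List (String × List String) :=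
  let pairs := ((split_docs_extract.zip split_docs_content).flatMap (fun pr => pr.1)).filter
    (fun p => schema.contains p.1 && !(p.2 == ""))
  pvGroup (PySem.List.dedup pairs)

-- ===== PRECONDITION & SPEC =====
def Spec_post_extract_res (split_docs_extract : List (List (String × String))) (split_docs_content : List String) (schema : List String) (out : List (String × List String)) : Prop := out = post_extract_res_alt split_docs_extract split_docs_content schema
instance (split_docs_extract : List (List (String × String))) (split_docs_content : List String) (schema : List String) (out : List (String × List String)) : Decidable (Spec_post_extract_res split_docs_extract split_docs_content schema out) := by unfold Spec_post_extract_res; infer_instance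

-- ===== CLAIM (what is proved, stated in full; the proofs are below) =====
def Claim_equal_post_extract_res : Prop := ∀ (split_docs_extract : List (List (String × String))) (split_docs_content : List String) (schema : List String), Dom_post_extract_res split_docs_extract split_docs_content schema → Spec_post_extract_res split_docs_extract split_docs_content schema (post_extract_res split_docs_extract split_docs_content schema)

-- ===== LEMMAS AND PROOFS =====

-- the unguarded dedup-append step (A's step after the validity filter)
def pvStep2 (kv : PySem.Dict String (List String)) (p : String × String) : PySem.Dict String (List String) :=
  if !(kv.contains p.1) then kv.insert p.1 (kv.getD p.1 [] ++ [p.2])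
  else if (kv.getD p.1 []).contains p.2 then kv
  else kv.insert p.1 (kv.getD p.1 [] ++ [p.2])

theorem pvStepA_eq (schema : List String) (kv : PySem.Dict String (List String)) (p : String × String) :
    pvStepA schema kv p = if (schema.contains p.1 && !(p.2 == "")) then pvStep2 kv p else kv := by
  unfold pvStepA pvStep2
  by_cases hs : schema.contains p.1 <;> by_cases hv : p.2 == "" <;> simp [hv]

theorem pvNested_eq_flat (schema : List String) (zl : List (List (String × String) × String)) :
    ∀ (d : PySem.Dict String (List String)),
      zl.foldl (fun kv pr => pr.1.foldl (pvStepA schema) kv) d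
        = (zl.flatMap (fun pr => pr.1)).foldl (pvStepA schema) d := by
  induction zl with
  | nil => intro d; rfl
  | cons pr t ih => intro d; simp [List.foldl_append, ih]

-- lookup in a dict whose items are keys.map (fun k => (k, f k))
theorem pvMkMap_get? (keys : List String) (f : String → List String) (k : String) :
    (PySem.Dict.mk (keys.map (fun k' => (k', f k')))).get? k
      = if k ∈ keys then some (f k) else none := by
  induction keys with
  | nil => simp [PySem.Dict.get?]
  | cons a t ih =>
    simp only [List.map_cons, PySem.Dict.get?_mk_cons, ih, List.mem_cons]
    by_cases h : a = k
    · subst h; simp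
    · have : (a == k) = false := by simpa using h
      simp [this, Ne.symm h]

theorem pvMkMap_contains (keys : List String) (f : String → List String) (k : String) :
    (PySem.Dict.mk (keys.map (fun k' => (k', f k')))).contains k = decide (k ∈ keys) := by
  rw [PySem.Dict.contains_eq_isSome_get?, pvMkMap_get?]
  by_cases h : k ∈ keys <;> simp [h]

theorem pvMkMap_getD (keys : List String) (f : String → List String) (k : String) :
    (PySem.Dict.mk (keys.map (fun k' => (k', f k')))).getD k []
      = if k ∈ keys then f k else [] := by
  rw [PySem.Dict.getD_eq_get?_getD, pvMkMap_get?]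
  by_cases h : k ∈ keys <;> simp [h]

theorem pvDedup_snoc {α : Type} [BEq α] (xs : List α) (x : α) :
    PySem.List.dedup (xs ++ [x]) = PySem.Set.add (PySem.List.dedup xs) x := by
  rw [PySem.List.dedup, PySem.List.dedup, PySem.Set.ofList_eq_foldl,
    PySem.Set.ofList_eq_foldl, List.foldl_append]
  rfl

theorem pvMemVals (L : List (String × String)) (p : String × String) :
    p.2 ∈ (L.filter (fun q => q.1 == p.1)).map Prod.snd ↔ p ∈ L := by
  simp only [List.mem_map, List.mem_filter, beq_iff_eq]
  constructor
  · rintro ⟨⟨a, b⟩, ⟨hm, ha⟩, hb⟩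
    simp only at ha hb
    have : (a, b) = p := by
      cases p; simp only [Prod.mk.injEq] at ha hb ⊢; exact ⟨ha, hb⟩
    exact this ▸ hm
  · intro hm; exact ⟨p, ⟨hm, rfl⟩, rfl⟩

-- the grouped dict built from a pair list
def pvGDict (l : List (String × String)) : PySem.Dict String (List String) :=
  PySem.Dict.mk (pvGroup l)

theorem pvGDict_contains (l : List (String × String)) (k : String) :
    (pvGDict l).contains k = decide (k ∈ l.map Prod.fst) := by
  unfold pvGDict pvGroup
  rw [pvMkMap_contains]
  simp [PySem.Set.mem_ofList]

theorem pvGDict_getD (l : List (String × String)) (k : String) :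
    (pvGDict l).getD k []
      = if k ∈ l.map Prod.fst then (l.filter (fun q => q.1 == k)).map Prod.snd else [] := by
  unfold pvGDict pvGroup
  rw [pvMkMap_getD]
  by_cases h : k ∈ l.map Prod.fst <;> simp [PySem.Set.mem_ofList, h]

-- one dedup-append step moves the grouped dict along Set.add
theorem pvStep2_gdict (l : List (String × String)) (p : String × String) :
    pvStep2 (pvGDict l) p = pvGDict (PySem.Set.add l p) := by
  unfold pvStep2
  by_cases hpL : p ∈ l
  · -- pair already present: both sides unchanged
    have hk1 : p.1 ∈ l.map Prod.fst := List.mem_map.mpr ⟨p, hpL, rfl⟩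
    have hc : (pvGDict l).contains p.1 = true := by rw [pvGDict_contains]; simp [hk1]
    have hg : (pvGDict l).getD p.1 [] = (l.filter (fun q => q.1 == p.1)).map Prod.snd := by
      rw [pvGDict_getD]; simp [hk1]
    have hv : ((l.filter (fun q => q.1 == p.1)).map Prod.snd).contains p.2 = true := by
      simpa using List.elem_eq_true_of_mem ((pvMemVals l p).mpr hpL)
    have hadd : PySem.Set.add l p = l := by simp [PySem.Set.add, hpL]
    rw [hc, hg, hv, hadd]
    simp
  · have hadd : PySem.Set.add l p = l ++ [p] := by simp [PySem.Set.add, hpL]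
    rw [hadd]
    by_cases hk1 : p.1 ∈ l.map Prod.fst
    · -- key seen before, value new: overwrite that key's entry in place
      have hc : (pvGDict l).contains p.1 = true := by rw [pvGDict_contains]; simp [hk1]
      have hg : (pvGDict l).getD p.1 [] = (l.filter (fun q => q.1 == p.1)).map Prod.snd := by
        rw [pvGDict_getD]; simp [hk1]
      have hv : ((l.filter (fun q => q.1 == p.1)).map Prod.snd).contains p.2 = false := by
        have : p.2 ∉ (l.filter (fun q => q.1 == p.1)).map Prod.snd := fun h =>
          hpL ((pvMemVals l p).mp h)
        simpa using this
      rw [hc, hg, hv]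
      simp only [Bool.not_true, Bool.false_eq_true, if_false]
      apply PySem.Dict.ext
      rw [PySem.Dict.items_insert_of_contains _ _ hc]
      show ((pvGroup l).map _ : List (String × List String)) = pvGroup (l ++ [p])
      unfold pvGroup
      have hkeys' : PySem.List.dedup ((l ++ [p]).map Prod.fst)
          = PySem.List.dedup (l.map Prod.fst) := by
        rw [List.map_append, List.map_singleton, pvDedup_snoc]
        simp [PySem.Set.add, PySem.Set.mem_ofList, hk1]
      rw [hkeys', List.map_map]
      apply List.map_congr_left
      intro k _
      by_cases h : k = p.1
      · subst h
        simp
      · have hbeq : (k == p.1) = false := by simpa using h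
        simp [h, Ne.symm h]
    · -- brand new key: entry appended at the end
      have hc : (pvGDict l).contains p.1 = false := by rw [pvGDict_contains]; simp [hk1]
      have hg : (pvGDict l).getD p.1 [] = [] := by rw [pvGDict_getD]; simp [hk1]
      rw [hc, hg]
      simp only [Bool.not_false, if_true, List.nil_append]
      apply PySem.Dict.ext
      rw [PySem.Dict.items_insert_of_not_contains _ _ hc]
      show (pvGroup l ++ _ : List (String × List String)) = pvGroup (l ++ [p])
      unfold pvGroup
      have hkeys' : PySem.List.dedup ((l ++ [p]).map Prod.fst)
          = PySem.List.dedup (l.map Prod.fst) ++ [p.1] := by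
        rw [List.map_append, List.map_singleton, pvDedup_snoc]
        simp [PySem.Set.add, PySem.Set.mem_ofList, hk1]
      rw [hkeys', List.map_append, List.map_singleton]
      congr 1
      · apply List.map_congr_left
        intro k hkmem
        have hkL : k ∈ l.map Prod.fst := (PySem.List.mem_dedup _ _).mp hkmem
        have hne : p.1 ≠ k := fun h => hk1 (h ▸ hkL)
        simp [hne]
      · have hfiltL : l.filter (fun q => q.1 == p.1) = [] := by
          rw [List.filter_eq_nil_iff]
          intro q hq h
          exact hk1 (List.mem_map.mpr ⟨q, hq, by simpa using beq_iff_eq.mp h⟩)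
        simp [hfiltL]

-- the core invariant: folding the dedup-append step builds exactly the grouped dedup'd pairs
theorem pvFold_eq_group (m : List (String × String)) :
    m.foldl pvStep2 PySem.Dict.empty = PySem.Dict.mk (pvGroup (PySem.List.dedup m)) := by
  induction m using List.reverseRecOn with
  | nil => rfl
  | append_singleton m p ih =>
    rw [List.foldl_append, List.foldl_cons, List.foldl_nil, ih, pvDedup_snoc]
    exact pvStep2_gdict (PySem.List.dedup m) p

-- ===== VERDICT (by name: the statement is the Claim_ definition above) =====
theorem post_extract_res_spec : Claim_equal_post_extract_res := by
  intro sde sdc schema _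
  unfold Spec_post_extract_res post_extract_res post_extract_res_alt
  rw [pvNested_eq_flat]
  have hstep : ∀ (kv : PySem.Dict String (List String)) (p : String × String),
      pvStepA schema kv p = if (schema.contains p.1 && !(p.2 == "")) then pvStep2 kv p else kv :=
    pvStepA_eq schema
  calc (((sde.zip sdc).flatMap (fun pr => pr.1)).foldl (pvStepA schema) PySem.Dict.empty).items
      = (((sde.zip sdc).flatMap (fun pr => pr.1)).foldl
          (fun kv p => if (schema.contains p.1 && !(p.2 == "")) then pvStep2 kv p else kv)
          PySem.Dict.empty).items := by
        congr 1
        exact PySem.List.foldl_congr_mem _ _ _ _ (fun acc x _ => hstep acc x)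
    _ = ((((sde.zip sdc).flatMap (fun pr => pr.1)).filter
          (fun p => schema.contains p.1 && !(p.2 == ""))).foldl pvStep2 PySem.Dict.empty).items := by
        rw [PySem.List.foldl_if_eq_foldl_filter]
    _ = _ := by rw [pvFold_eq_group]
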